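-- pv_equiv track=rewrite | github.com/polirritmico/codesignal_solutions | Python/wellOfIntegration.py | solution
-- ===== SOURCE A (Python) =====
-- def solution(legs):
--     people_legs = 2
--     cat_legs = 4
--     max_cats = legs // cat_legs
--     supposed_people = [legs // people_legs]
--     for supposed_cats in range(1, max_cats + 1):
--         remaining_legs = legs - (supposed_cats * cat_legs)
--         supposed_people.append(remaining_legs // people_legs)
--     return sorted(supposed_people)
-- ===== SOURCE B (Python) =====
-- def solution(legs):
--     half = legs // 2
--     n = max(legs // 4, 0)
--     return list(range(half - 2 * n, half + 1, 2))
-- ===== Notes on version B (the rewrite author's own statement) =====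
-- stated objective: simpler
-- what changed: Replaces A's append-loop over cat counts followed by a sort with a single closed-form arithmetic range whose endpoints are computed directly from legs.
import Mathlib
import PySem

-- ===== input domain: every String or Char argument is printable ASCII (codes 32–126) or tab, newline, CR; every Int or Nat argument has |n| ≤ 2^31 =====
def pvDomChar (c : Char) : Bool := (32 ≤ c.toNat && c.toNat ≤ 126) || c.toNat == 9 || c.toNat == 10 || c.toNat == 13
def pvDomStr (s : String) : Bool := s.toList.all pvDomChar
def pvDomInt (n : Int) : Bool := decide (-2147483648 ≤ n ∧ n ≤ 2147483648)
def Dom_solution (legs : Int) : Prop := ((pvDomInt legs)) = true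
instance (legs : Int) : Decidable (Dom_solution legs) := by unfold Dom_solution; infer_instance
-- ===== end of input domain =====

-- B replaces A's append-loop over cat counts plus a final sort by one closed-form
-- arithmetic range; equivalence of the return values is proved for all Int inputs.

-- ===== PORT A =====
def solution (legs : Int) : List Int :=
  let people_legs : Int := 2
  let cat_legs : Int := 4
  let max_cats := PySem.Int.floordiv legs cat_legs
  let supposed_people := [PySem.Int.floordiv legs people_legs]
  let supposed_people :=
    (PySem.List.pyRange 1 (max_cats + 1) 1).foldl
      (fun acc supposed_cats =>
        acc ++ [PySem.Int.floordiv (legs - supposed_cats * cat_legs) people_legs])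
      supposed_people
  PySem.List.sorted supposed_people (fun x => x)

-- ===== PORT B =====
def solution_alt (legs : Int) : List Int :=
  let half := PySem.Int.floordiv legs 2
  let n := max (PySem.Int.floordiv legs 4) 0
  PySem.List.pyRange (half - 2 * n) (half + 1) 2

-- ===== PRECONDITION & SPEC =====
def Spec_solution (legs : Int) (out : List Int) : Prop := out = solution_alt legs
instance (legs : Int) (out : List Int) : Decidable (Spec_solution legs out) := by unfold Spec_solution; infer_instance

-- ===== CLAIM (what is proved, stated in full; the proofs are below) =====
def Claim_equal_solution : Prop := ∀ (legs : Int), Dom_solution legs → Spec_solution legs (solution legs)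

-- ===== LEMMAS AND PROOFS =====

-- B's range is strictly increasing.
lemma alt_pairwise (legs : Int) : (solution_alt legs).Pairwise (· < ·) := by
  unfold solution_alt
  rw [PySem.List.pyRange_of_pos _ _ (by norm_num)]
  rw [List.pairwise_map]
  exact List.pairwise_lt_range.imp (fun h => by omega)

-- A's unsorted accumulator equals B's range reversed.
lemma acc_eq_reverse (legs : Int) :
    [PySem.Int.floordiv legs 2] ++
      (PySem.List.pyRange 1 (PySem.Int.floordiv legs 4 + 1) 1).map
        (fun k => PySem.Int.floordiv (legs - k * 4) 2) =
    (solution_alt legs).reverse := by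
  unfold solution_alt
  rw [PySem.Int.floordiv_eq_ediv_of_pos (a := legs) (b := 2) (by norm_num),
      PySem.Int.floordiv_eq_ediv_of_pos (a := legs) (b := 4) (by norm_num)]
  rw [PySem.List.pyRange_of_pos _ _ (by norm_num : (0:Int) < 2)]
  rw [PySem.List.pyRange_one]
  rw [if_pos (show legs / 2 - 2 * max (legs / 4) 0 < legs / 2 + 1 by
        have := le_max_right (legs / 4) (0 : Int); omega)]
  rcases max_cases (legs / 4) (0 : Int) with ⟨hM, hge⟩ | ⟨hM, hlt⟩ <;>
  · rw [hM]
    apply List.ext_getElem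
    · simp only [List.length_append, List.length_map, List.length_range,
        List.length_reverse, List.length_cons, List.length_nil]
      omega
    · intro i h1 h2
      rw [List.getElem_reverse]
      simp only [List.length_append, List.length_map, List.length_range,
        List.length_cons, List.length_nil] at h1 h2 ⊢
      rcases i with _ | i
      · simp only [List.singleton_append, List.getElem_cons_zero, List.getElem_map,
          List.getElem_range]
        omega
      · simp only [List.singleton_append, List.getElem_cons_succ, List.getElem_map,
          List.getElem_range]
        rw [PySem.Int.floordiv_eq_ediv_of_pos (by norm_num)]
        omega

-- ===== VERDICT (by name: the statement is the Claim_ definition above) =====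
theorem solution_spec : Claim_equal_solution := by
  intro legs _
  show solution legs = solution_alt legs
  unfold solution
  simp only [PySem.List.foldl_append_singleton_eq_map]
  apply PySem.List.sorted_eq_of_perm_of_pairwise_lt
  · rw [acc_eq_reverse legs]
    exact (List.reverse_perm _).symm
  · exact alt_pairwise legs
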